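-- pv_equiv track=rewrite | github.com/Seebee87/CS325_S21 | Week9/GetTesla.py | getTesla
-- ===== SOURCE A (Python) =====
-- def getTesla(maze):
--     col = len(maze[0])-1
--     row = len(maze)-1
--     empty = [["" for p in range(col+1)] for s in range(row+1)]
--     empty[row][col] = maze[row][col]
--     for i in reversed(range(row+1)):
--         for j in reversed(range(col+1)):
--             if j > 0: #we go left
--                 if empty[i][j-1] == "":
--                     empty[i][j-1] = maze[i][j-1]+empty[i][j]
--                 else:
--                     empty[i][j-1] = max(empty[i][j-1], maze[i][j-1]+empty[i][j])
--             if i > 0: #then we go up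
--                 empty[i-1][j] = maze[i-1][j]+empty[i][j]
--     keys = empty[0][0]
--     if keys <=0:
--         keys = abs(keys)
--         return keys + 1
--     else:
--         return 1
-- ===== SOURCE B (Python) =====
-- def getTesla(maze):
--     # Top-down memoized recursion on the max right/down path sum from (i, j),
--     # instead of A's bottom-up 2D-table DP; then the same final transform.
--     R = len(maze)
--     C = len(maze[0])
--     memo = {}
--     def best(i, j):
--         if (i, j) in memo:
--             return memo[(i, j)]
--         down = best(i + 1, j) if i + 1 < R else None
--         right = best(i, j + 1) if j + 1 < C else None
--         if down is None and right is None: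
--             v = maze[i][j]
--         elif right is None:
--             v = maze[i][j] + down
--         elif down is None:
--             v = maze[i][j] + right
--         else:
--             v = maze[i][j] + max(down, right)
--         memo[(i, j)] = v
--         return v
--     keys = best(0, 0)
--     return 1 if keys > 0 else abs(keys) + 1
-- ===== Notes on version B (the rewrite author's own statement) =====
-- stated objective: alternative
-- what changed: B replaces A's iterative bottom-up 2D-table DP (in-place left/up overwrite-and-max updates over a preallocated grid) by a top-down recursive definition best(i,j) with a dictionary memo, recursing on the down/right neighbours from (0,0), then applies the same final transform.
import Mathlib
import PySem

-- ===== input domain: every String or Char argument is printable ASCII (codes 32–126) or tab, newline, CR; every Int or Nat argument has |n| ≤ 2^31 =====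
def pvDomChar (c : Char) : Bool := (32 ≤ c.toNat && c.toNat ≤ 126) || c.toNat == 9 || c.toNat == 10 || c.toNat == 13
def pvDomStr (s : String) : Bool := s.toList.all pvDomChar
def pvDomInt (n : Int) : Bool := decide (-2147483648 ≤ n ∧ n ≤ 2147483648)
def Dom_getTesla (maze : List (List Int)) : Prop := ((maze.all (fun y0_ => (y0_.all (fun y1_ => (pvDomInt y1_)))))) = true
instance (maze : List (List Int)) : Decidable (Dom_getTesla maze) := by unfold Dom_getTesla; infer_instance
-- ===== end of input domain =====

-- B replaces A's iterative bottom-up 2D-table DP by a top-down memoized recursion from (0,0).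

-- ===== PORT A =====
-- maze[i][j]; the default 0 is unreachable under Pre_getTesla (indices are in range there)
def pvGv (maze : List (List Int)) (i j : Nat) : Int := (maze.getD i []).getD j 0

-- unwraps a table entry; at every use site the Python entry is an int (never ""), so default 0 is unreachable under Pre_
def pvOg (o : Option Int) : Int := o.getD 0

-- the table `empty`: Option Int cells, none = Python's ""
def pvGet2 (t : List (List (Option Int))) (i j : Nat) : Option Int := (t.getD i []).getD j none

def pvSet2 (t : List (List (Option Int))) (i j : Nat) (v : Option Int) : List (List (Option Int)) :=
  t.set i ((t.getD i []).set j v)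

-- body of the double loop of A for cell (i, j)
def pvCell (maze : List (List Int)) (i j : Nat) (t : List (List (Option Int))) : List (List (Option Int)) :=
  let t1 :=
    if 0 < j then
      match pvGet2 t i (j-1) with
      | none => pvSet2 t i (j-1) (some (pvGv maze i (j-1) + pvOg (pvGet2 t i j)))
      | some old => pvSet2 t i (j-1) (some (max old (pvGv maze i (j-1) + pvOg (pvGet2 t i j))))
    else t
  if 0 < i then pvSet2 t1 (i-1) j (some (pvGv maze (i-1) j + pvOg (pvGet2 t1 i j))) else t1

def getTesla (maze : List (List Int)) : Int :=
  let R := maze.length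
  let C := (maze.getD 0 []).length        -- len(maze[0]); Python raises IndexError on maze = [], excluded by Pre_
  let empty0 : List (List (Option Int)) := List.replicate R (List.replicate C none)
  let empty1 := pvSet2 empty0 (R-1) (C-1) (some (pvGv maze (R-1) (C-1)))
  let tF := (List.range R).reverse.foldl
      (fun t i => (List.range C).reverse.foldl (fun t j => pvCell maze i j t) t) empty1
  let keys := pvOg (pvGet2 tF 0 0)
  if keys ≤ 0 then -keys + 1 else 1

-- ===== PORT B =====
-- best(i, j) of Source B: memo hit first, else recurse down (i+1, j) then right (i, j+1),
-- threading the memo dict through; returns (value, updated memo)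
def pvBestM (maze : List (List Int)) (R C i j : Nat) (memo : PySem.Dict (Nat × Nat) Int) :
    Int × PySem.Dict (Nat × Nat) Int :=
  match memo.get? (i, j) with
  | some v => (v, memo)
  | none =>
    let p1 : Option Int × PySem.Dict (Nat × Nat) Int :=
      if _h : i + 1 < R then
        let r := pvBestM maze R C (i+1) j memo
        (some r.1, r.2)
      else (none, memo)
    let p2 : Option Int × PySem.Dict (Nat × Nat) Int :=
      if _h : j + 1 < C then
        let r := pvBestM maze R C i (j+1) p1.2
        (some r.1, r.2)
      else (none, p1.2)
    let v : Int :=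
      match p1.1, p2.1 with
      | none, none => pvGv maze i j
      | some dv, none => pvGv maze i j + dv
      | none, some rv => pvGv maze i j + rv
      | some dv, some rv => pvGv maze i j + max dv rv
    (v, p2.2.insert (i, j) v)
termination_by (R - i) + (C - j)
decreasing_by all_goals omega

def getTesla_alt (maze : List (List Int)) : Int :=
  let R := maze.length
  let C := (maze.getD 0 []).length        -- len(maze[0])
  let keys := (pvBestM maze R C 0 0 PySem.Dict.empty).1
  if 0 < keys then 1 else -keys + 1

-- ===== PRECONDITION & SPEC =====
-- Pre_ is exactly A's return domain: Python A raises IndexError iff the maze is empty, its first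
-- row is empty, or some row is shorter than the first row (maze[i][j] is read for all j < len(maze[0])).
def Pre_getTesla (maze : List (List Int)) : Prop :=
  maze ≠ [] ∧ 0 < (maze.getD 0 []).length ∧ ∀ r ∈ maze, (maze.getD 0 []).length ≤ r.length

instance (maze : List (List Int)) : Decidable (Pre_getTesla maze) := by unfold Pre_getTesla; infer_instance

def pvWitness_getTesla : List (List Int) := [[1, -2], [3, 4]]

def Spec_getTesla (maze : List (List Int)) (out : Int) : Prop := out = getTesla_alt maze
instance (maze : List (List Int)) (out : Int) : Decidable (Spec_getTesla maze out) := by unfold Spec_getTesla; infer_instance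

-- ===== CLAIM (what is proved, stated in full; the proofs are below) =====
def Claim_equal_getTesla : Prop := ∀ (maze : List (List Int)), Dom_getTesla maze → Pre_getTesla maze → Spec_getTesla maze (getTesla maze)

-- ===== LEMMAS AND PROOFS =====

-- mathematical value: best right/down path sum starting at (i, j)
def pvVals (maze : List (List Int)) (i j : Nat) : Int :=
  pvGv maze i j +
    (if _h1 : i + 1 < maze.length then
       (if _h2 : j + 1 < (maze.getD 0 []).length then
          max (pvVals maze (i+1) j) (pvVals maze i (j+1))
        else pvVals maze (i+1) j)
     else (if _h2 : j + 1 < (maze.getD 0 []).length then pvVals maze i (j+1) else 0))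
termination_by (maze.length - i) + ((maze.getD 0 []).length - j)
decreasing_by all_goals omega

theorem pvVals_last (maze : List (List Int)) (i : Nat) (hC : 0 < (maze.getD 0 []).length) :
    pvVals maze i ((maze.getD 0 []).length - 1) =
      pvGv maze i ((maze.getD 0 []).length - 1) +
        (if i + 1 < maze.length then pvVals maze (i+1) ((maze.getD 0 []).length - 1) else 0) := by
  rw [pvVals]
  have h2 : ¬ ((maze.getD 0 []).length - 1 + 1 < (maze.getD 0 []).length) := by omega
  by_cases h1 : i + 1 < maze.length
  · rw [dif_pos h1, dif_neg h2, if_pos h1]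
  · rw [dif_neg h1, dif_neg h2, if_neg h1]

theorem pvVals_step (maze : List (List Int)) (i j : Nat) (hj : j + 1 < (maze.getD 0 []).length) :
    pvVals maze i j =
      pvGv maze i j +
        (if i + 1 < maze.length then max (pvVals maze (i+1) j) (pvVals maze i (j+1))
         else pvVals maze i (j+1)) := by
  rw [pvVals]
  by_cases h1 : i + 1 < maze.length
  · rw [dif_pos h1, dif_pos hj, if_pos h1]
  · rw [dif_neg h1, dif_pos hj, if_neg h1]

theorem pvGetD_lt {α : Type} [Inhabited α] (l : List α) (n : Nat) (d : α) (h : n < l.length) :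
    l.getD n d = l[n] := by
  rw [List.getD_eq_getElem?_getD, List.getElem?_eq_getElem h]; rfl

-- ---- table machinery for A ----
def pvShape (R C : Nat) (t : List (List (Option Int))) : Prop :=
  t.length = R ∧ ∀ l ∈ t, l.length = C

theorem pvShape_set2 {R C : Nat} {t : List (List (Option Int))} (h : pvShape R C t)
    (i j : Nat) (v : Option Int) : pvShape R C (pvSet2 t i j v) := by
  unfold pvSet2
  by_cases hi : i < t.length
  · refine ⟨by simp [h.1], ?_⟩
    intro l hl
    rcases List.mem_or_eq_of_mem_set hl with hl | rfl
    · exact h.2 l hl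
    · rw [pvGetD_lt t i [] hi]
      simp [h.2 _ (List.getElem_mem hi)]
  · rw [List.set_eq_of_length_le (by omega)]; exact h

theorem pvGet2_set2 {R C : Nat} {t : List (List (Option Int))} (h : pvShape R C t)
    {i j : Nat} (hi : i < R) (hj : j < C) (v : Option Int) (r s : Nat) :
    pvGet2 (pvSet2 t i j v) r s = if r = i ∧ s = j then v else pvGet2 t r s := by
  have hlen : t.length = R := h.1
  have hrowlen : (t.getD i []).length = C := by
    rw [pvGetD_lt t i [] (by omega)]
    exact h.2 _ (List.getElem_mem (by omega))
  unfold pvGet2 pvSet2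
  by_cases hri : r = i
  · subst hri
    have hset : (t.set r ((t.getD r []).set j v)).getD r [] = (t.getD r []).set j v := by
      rw [List.getD_eq_getElem?_getD, List.getElem?_set]
      simp [show r < t.length by omega]
    rw [hset]
    by_cases hsj : s = j
    · subst hsj
      rw [if_pos ⟨rfl, rfl⟩, List.getD_eq_getElem?_getD, List.getElem?_set]
      have hs : s < (t[r]?.getD ([] : List (Option Int))).length := by
        rw [← List.getD_eq_getElem?_getD]; omega
      simp [hs]
    · rw [if_neg (by tauto), List.getD_eq_getElem?_getD, List.getElem?_set]
      simp [Ne.symm hsj, List.getD_eq_getElem?_getD]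
  · rw [if_neg (by tauto)]
    have : (t.set i ((t.getD i []).set j v)).getD r [] = t.getD r [] := by
      rw [List.getD_eq_getElem?_getD, List.getElem?_set]
      simp [Ne.symm hri, List.getD_eq_getElem?_getD]
    rw [this]

-- expected table contents while row m is being processed, next column to process is k-1
def pvExpectC (maze : List (List Int)) (R _C m k r j : Nat) : Option Int :=
  if m < r then some (pvVals maze r j)
  else if r = m then
    (if k ≤ j + 1 then some (pvVals maze r j)
     else if m + 1 = R then none else some (pvGv maze r j + pvVals maze (r+1) j))
  else if r + 1 = m then
    (if k ≤ j then some (pvGv maze r j + pvVals maze m j) else none)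
  else none

def pvInvC (maze : List (List Int)) (R C m k : Nat) (t : List (List (Option Int))) : Prop :=
  pvShape R C t ∧ ∀ r < R, ∀ j < C, pvGet2 t r j = pvExpectC maze R C m k r j

-- expected table contents when rows ≥ m are fully processed
def pvExpectO (maze : List (List Int)) (R C m r j : Nat) : Option Int :=
  if m ≤ r then some (pvVals maze r j)
  else if r + 1 = m then
    (if m = R then (if j = C - 1 then some (pvGv maze r j) else none)
     else some (pvGv maze r j + pvVals maze m j))
  else none

def pvInvO (maze : List (List Int)) (R C m : Nat) (t : List (List (Option Int))) : Prop :=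
  pvShape R C t ∧ ∀ r < R, ∀ j < C, pvGet2 t r j = pvExpectO maze R C m r j

theorem pvExpC_shift (maze : List (List Int)) (R C m c r j : Nat)
    (h1 : ¬(0 < m ∧ r = m - 1 ∧ j = c)) (h2 : ¬(0 < c ∧ r = m ∧ j = c - 1)) :
    pvExpectC maze R C m (c+1) r j = pvExpectC maze R C m c r j := by
  unfold pvExpectC
  split_ifs <;> first | rfl | omega

theorem pvCell_step (maze : List (List Int)) (m c : Nat) (t : List (List (Option Int)))
    (hR : m < maze.length) (hc : c < (maze.getD 0 []).length)
    (hInv : pvInvC maze maze.length (maze.getD 0 []).length m (c+1) t) :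
    pvInvC maze maze.length (maze.getD 0 []).length m c (pvCell maze m c t) := by
  obtain ⟨hsh, hget⟩ := hInv
  have hmc : pvGet2 t m c = some (pvVals maze m c) := by
    rw [hget m hR c hc]
    unfold pvExpectC
    simp
  have ht1 : (if 0 < c then
      match pvGet2 t m (c-1) with
      | none => pvSet2 t m (c-1) (some (pvGv maze m (c-1) + pvOg (pvGet2 t m c)))
      | some old => pvSet2 t m (c-1) (some (max old (pvGv maze m (c-1) + pvOg (pvGet2 t m c))))
      else t) =
      (if 0 < c then pvSet2 t m (c-1) (some (pvVals maze m (c-1))) else t) := by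
    by_cases hc0 : 0 < c
    · rw [if_pos hc0, if_pos hc0]
      have hm1 : pvGet2 t m (c-1) =
          (if m + 1 = maze.length then none
           else some (pvGv maze m (c-1) + pvVals maze (m+1) (c-1))) := by
        rw [hget m hR (c-1) (by omega)]
        unfold pvExpectC
        have hx : ¬ (c + 1 ≤ c - 1 + 1) := by omega
        simp [hx]
      have hcc : c - 1 + 1 = c := by omega
      have hstep := pvVals_step maze m (c-1) (by omega)
      rw [hcc] at hstep
      by_cases hmr : m + 1 = maze.length
      · rw [hm1, if_pos hmr]
        simp only [hmc]
        have : ¬ (m + 1 < maze.length) := by omega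
        rw [if_neg this] at hstep
        unfold pvOg
        rw [hstep]
        rfl
      · rw [hm1, if_neg hmr]
        simp only [hmc]
        have hlt : m + 1 < maze.length := by omega
        rw [if_pos hlt] at hstep
        unfold pvOg
        simp only [Option.getD_some]
        rw [max_add_add_left, hstep]
    · rw [if_neg hc0, if_neg hc0]
  unfold pvCell
  simp only []
  rw [ht1]
  have hsh1 : pvShape maze.length (maze.getD 0 []).length
      (if 0 < c then pvSet2 t m (c-1) (some (pvVals maze m (c-1))) else t) := by
    by_cases hc0 : 0 < c
    · rw [if_pos hc0]; exact pvShape_set2 hsh _ _ _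
    · rw [if_neg hc0]; exact hsh
  have ht1get : ∀ r' j', pvGet2 (if 0 < c then pvSet2 t m (c-1) (some (pvVals maze m (c-1))) else t) r' j' =
      if 0 < c ∧ r' = m ∧ j' = c - 1 then some (pvVals maze m (c-1)) else pvGet2 t r' j' := by
    intro r' j'
    by_cases hc0 : 0 < c
    · rw [if_pos hc0, pvGet2_set2 hsh hR (by omega)]
      by_cases hcase : r' = m ∧ j' = c - 1
      · rw [if_pos hcase, if_pos ⟨hc0, hcase.1, hcase.2⟩]
      · rw [if_neg hcase, if_neg (show ¬ (0 < c ∧ r' = m ∧ j' = c - 1) by tauto)]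
    · rw [if_neg hc0, if_neg (show ¬ (0 < c ∧ r' = m ∧ j' = c - 1) by tauto)]
  have ht1mc : pvGet2 (if 0 < c then pvSet2 t m (c-1) (some (pvVals maze m (c-1))) else t) m c =
      some (pvVals maze m c) := by
    rw [ht1get, if_neg (by omega)]; exact hmc
  constructor
  · by_cases hm0 : 0 < m
    · rw [if_pos hm0]; exact pvShape_set2 hsh1 _ _ _
    · rw [if_neg hm0]; exact hsh1
  · intro r hr j hj
    have hfin : pvGet2 (if 0 < m then
        pvSet2 (if 0 < c then pvSet2 t m (c-1) (some (pvVals maze m (c-1))) else t) (m-1) c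
          (some (pvGv maze (m-1) c +
            pvOg (pvGet2 (if 0 < c then pvSet2 t m (c-1) (some (pvVals maze m (c-1))) else t) m c)))
        else (if 0 < c then pvSet2 t m (c-1) (some (pvVals maze m (c-1))) else t)) r j =
        if 0 < m ∧ r = m - 1 ∧ j = c then some (pvGv maze (m-1) c + pvVals maze m c)
        else pvGet2 (if 0 < c then pvSet2 t m (c-1) (some (pvVals maze m (c-1))) else t) r j := by
      by_cases hm0 : 0 < m
      · rw [if_pos hm0, pvGet2_set2 hsh1 (by omega) hc, ht1mc]
        by_cases hcase : r = m - 1 ∧ j = c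
        · rw [if_pos hcase, if_pos ⟨hm0, hcase.1, hcase.2⟩]; rfl
        · rw [if_neg hcase, if_neg (show ¬ (0 < m ∧ r = m - 1 ∧ j = c) by tauto)]
      · rw [if_neg hm0, if_neg (show ¬ (0 < m ∧ r = m - 1 ∧ j = c) by tauto)]
    rw [hfin]
    by_cases A1 : 0 < m ∧ r = m - 1 ∧ j = c
    · rw [if_pos A1]
      obtain ⟨hm0, rfl, rfl⟩ := A1
      unfold pvExpectC
      rw [if_neg (by omega), if_neg (by omega), if_pos (by omega), if_pos (by omega)]
    · rw [if_neg A1, ht1get]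
      by_cases A2 : 0 < c ∧ r = m ∧ j = c - 1
      · rw [if_pos A2]
        obtain ⟨hc0, rfl, rfl⟩ := A2
        unfold pvExpectC
        rw [if_neg (by omega), if_pos rfl, if_pos (by omega)]
      · rw [if_neg A2, hget r hr j hj, pvExpC_shift maze _ _ m c r j A1 A2]

theorem pvInner_fold (maze : List (List Int)) (m : Nat) (hR : m < maze.length) :
    ∀ (k : Nat), k ≤ (maze.getD 0 []).length → ∀ t,
      pvInvC maze maze.length (maze.getD 0 []).length m k t →
      pvInvC maze maze.length (maze.getD 0 []).length m 0
        ((List.range k).reverse.foldl (fun t j => pvCell maze m j t) t) := by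
  intro k
  induction k with
  | zero => intro _ t h; simpa using h
  | succ k ih =>
    intro hk t h
    rw [List.range_succ, List.reverse_append]
    simp only [List.reverse_singleton, List.singleton_append, List.foldl_cons]
    exact ih (by omega) _ (pvCell_step maze m k t hR (by omega) h)

theorem pvExpC_start (maze : List (List Int)) (m : Nat) (hR : m < maze.length)
    (hC : 0 < (maze.getD 0 []).length) (r j : Nat) (hr : r < maze.length)
    (hj : j < (maze.getD 0 []).length) :
    pvExpectC maze maze.length (maze.getD 0 []).length m (maze.getD 0 []).length r j =
      pvExpectO maze maze.length (maze.getD 0 []).length (m+1) r j := by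
  have hlast := pvVals_last maze m hC
  unfold pvExpectC pvExpectO
  by_cases h1 : m < r
  · rw [if_pos h1, if_pos (by omega : m + 1 ≤ r)]
  · rw [if_neg h1]
    by_cases h2 : r = m
    · subst h2
      rw [if_pos rfl, if_neg (by omega : ¬ (r + 1 ≤ r))]
      by_cases h3 : (maze.getD 0 []).length ≤ j + 1
      · obtain rfl : j = (maze.getD 0 []).length - 1 := by omega
        rw [if_pos h3, if_pos rfl]
        by_cases h4 : r + 1 = maze.length
        · rw [if_pos h4, if_pos rfl]
          rw [if_neg (by omega : ¬ (r + 1 < maze.length))] at hlast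
          rw [hlast]
          simp
        · rw [if_neg h4]
          rw [if_pos (by omega : r + 1 < maze.length)] at hlast
          rw [hlast]
      · rw [if_neg h3, if_pos rfl]
        by_cases h4 : r + 1 = maze.length
        · rw [if_pos h4, if_pos h4, if_neg (by omega : ¬ j = (maze.getD 0 []).length - 1)]
        · rw [if_neg h4, if_neg h4]
    · rw [if_neg h2]
      by_cases h3 : r + 1 = m
      · rw [if_pos h3, if_neg (by omega : ¬ ((maze.getD 0 []).length ≤ j)),
          if_neg (by omega : ¬ (m + 1 ≤ r)), if_neg (by omega : ¬ (r + 1 = m + 1))]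
      · rw [if_neg h3, if_neg (by omega : ¬ (m + 1 ≤ r)), if_neg (by omega : ¬ (r + 1 = m + 1))]

theorem pvExpC_end (maze : List (List Int)) (m : Nat) (hR : m < maze.length) (r j : Nat) :
    pvExpectC maze maze.length (maze.getD 0 []).length m 0 r j =
      pvExpectO maze maze.length (maze.getD 0 []).length m r j := by
  unfold pvExpectC pvExpectO
  split_ifs <;> first | rfl | omega

theorem pvOuter_fold (maze : List (List Int)) (hC : 0 < (maze.getD 0 []).length) :
    ∀ (m : Nat), m ≤ maze.length → ∀ t,
      pvInvO maze maze.length (maze.getD 0 []).length m t →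
      pvInvO maze maze.length (maze.getD 0 []).length 0
        ((List.range m).reverse.foldl
          (fun t i => (List.range (maze.getD 0 []).length).reverse.foldl
            (fun t j => pvCell maze i j t) t) t) := by
  intro m
  induction m with
  | zero => intro _ t h; simpa using h
  | succ m ih =>
    intro hm t h
    rw [List.range_succ, List.reverse_append]
    simp only [List.reverse_singleton, List.singleton_append, List.foldl_cons]
    have hmR : m < maze.length := by omega
    have hC1 : pvInvC maze maze.length (maze.getD 0 []).length m (maze.getD 0 []).length t := by
      refine ⟨h.1, ?_⟩
      intro r hr j hj
      rw [h.2 r hr j hj, ← pvExpC_start maze m hmR hC r j hr hj]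
    have hC0 := pvInner_fold maze m hmR (maze.getD 0 []).length le_rfl t hC1
    refine ih (by omega) _ ⟨hC0.1, ?_⟩
    intro r hr j hj
    rw [hC0.2 r hr j hj, pvExpC_end maze m hmR r j]

theorem pvA_value (maze : List (List Int)) (hP : Pre_getTesla maze) :
    getTesla maze = if pvVals maze 0 0 ≤ 0 then -(pvVals maze 0 0) + 1 else 1 := by
  obtain ⟨hne, hC, _⟩ := hP
  have hR : 0 < maze.length := List.length_pos_iff.mpr hne
  have hshape0 : pvShape maze.length (maze.getD 0 []).length
      (List.replicate maze.length (List.replicate (maze.getD 0 []).length (none : Option Int))) := by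
    refine ⟨by simp, ?_⟩
    intro l hl
    rw [List.eq_of_mem_replicate hl]
    simp
  have hinit : pvInvO maze maze.length (maze.getD 0 []).length maze.length
      (pvSet2 (List.replicate maze.length (List.replicate (maze.getD 0 []).length none))
        (maze.length - 1) ((maze.getD 0 []).length - 1)
        (some (pvGv maze (maze.length - 1) ((maze.getD 0 []).length - 1)))) := by
    refine ⟨pvShape_set2 hshape0 _ _ _, ?_⟩
    intro r hr j hj
    rw [pvGet2_set2 hshape0 (by omega) (by omega)]
    have hbase : pvGet2 (List.replicate maze.length
        (List.replicate (maze.getD 0 []).length (none : Option Int))) r j = none := by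
      unfold pvGet2
      have h1 : (List.replicate maze.length
          (List.replicate (maze.getD 0 []).length (none : Option Int))).getD r [] =
          List.replicate (maze.getD 0 []).length none := by
        rw [pvGetD_lt _ r [] (by simpa using hr)]
        simp
      rw [h1, pvGetD_lt _ j none (by simpa using hj)]
      simp
    unfold pvExpectO
    by_cases h1 : r = maze.length - 1 ∧ j = (maze.getD 0 []).length - 1
    · obtain ⟨rfl, rfl⟩ := h1
      rw [if_pos ⟨rfl, rfl⟩, if_neg (by omega), if_pos (by omega), if_pos rfl, if_pos rfl]
    · rw [if_neg h1, hbase]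
      split_ifs <;> first | rfl | omega
  have hfinal := pvOuter_fold maze hC maze.length le_rfl _ hinit
  have h00 : pvGet2 ((List.range maze.length).reverse.foldl
      (fun t i => (List.range (maze.getD 0 []).length).reverse.foldl
        (fun t j => pvCell maze i j t) t)
      (pvSet2 (List.replicate maze.length (List.replicate (maze.getD 0 []).length none))
        (maze.length - 1) ((maze.getD 0 []).length - 1)
        (some (pvGv maze (maze.length - 1) ((maze.getD 0 []).length - 1))))) 0 0 =
      some (pvVals maze 0 0) := by
    rw [hfinal.2 0 hR 0 hC]
    unfold pvExpectO
    rw [if_pos (by omega)]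
  unfold getTesla
  simp only []
  rw [h00]
  rfl

-- ---- B-side: the memoized recursion computes pvVals ----
def pvGood (maze : List (List Int)) (memo : PySem.Dict (Nat × Nat) Int) : Prop :=
  ∀ i j v, memo.get? (i, j) = some v → v = pvVals maze i j

theorem pvBestM_spec (maze : List (List Int)) :
    ∀ (n i j : Nat) (memo : PySem.Dict (Nat × Nat) Int),
      maze.length - i + ((maze.getD 0 []).length - j) ≤ n → pvGood maze memo →
      (pvBestM maze maze.length (maze.getD 0 []).length i j memo).1 = pvVals maze i j ∧
      pvGood maze (pvBestM maze maze.length (maze.getD 0 []).length i j memo).2 := by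
  intro n
  induction n with
  | zero =>
    intro i j memo hn hg
    rw [pvBestM]
    cases hm : memo.get? (i, j) with
    | some v => exact ⟨hg i j v hm, hg⟩
    | none =>
      have h1 : ¬ (i + 1 < maze.length) := by omega
      have h2 : ¬ (j + 1 < (maze.getD 0 []).length) := by omega
      simp only [dif_neg h1, dif_neg h2]
      constructor
      · rw [pvVals, dif_neg h1, dif_neg h2]
        simp [pvGv]
      · intro i' j' v' hv'
        rw [PySem.Dict.get?_insert] at hv'
        by_cases hij : (i', j') = (i, j)
        · rw [if_pos hij] at hv'
          cases hij
          rw [pvVals, dif_neg h1, dif_neg h2]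
          simp only [Option.some.injEq] at hv'
          rw [← hv']
          simp [pvGv]
        · rw [if_neg hij] at hv'
          exact hg i' j' v' hv'
  | succ n ih =>
    intro i j memo hn hg
    rw [pvBestM]
    cases hm : memo.get? (i, j) with
    | some v => exact ⟨hg i j v hm, hg⟩
    | none =>
      by_cases h1 : i + 1 < maze.length <;> by_cases h2 : j + 1 < (maze.getD 0 []).length <;>
        simp only [dif_pos, h1, h2, dite_false]
      · -- both
        obtain ⟨hd1, hgd1⟩ := ih (i+1) j memo (by omega) hg
        obtain ⟨hd2, hgd2⟩ := ih i (j+1) _ (by omega) hgd1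
        simp only [hd1, hd2]
        have hv : pvGv maze i j + max (pvVals maze (i+1) j) (pvVals maze i (j+1)) = pvVals maze i j := by
          conv_rhs => rw [pvVals]
          rw [dif_pos h1, dif_pos h2]
        refine ⟨hv, ?_⟩
        intro i' j' v' hv'
        rw [PySem.Dict.get?_insert] at hv'
        by_cases hij : (i', j') = (i, j)
        · rw [if_pos hij] at hv'
          cases hij
          simp only [Option.some.injEq] at hv'
          rw [← hv', hv]
        · rw [if_neg hij] at hv'
          exact hgd2 i' j' v' hv'
      · -- only down
        obtain ⟨hd1, hgd1⟩ := ih (i+1) j memo (by omega) hg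
        simp only [hd1]
        have hv : pvGv maze i j + pvVals maze (i+1) j = pvVals maze i j := by
          conv_rhs => rw [pvVals]
          rw [dif_pos h1, dif_neg h2]
        refine ⟨hv, ?_⟩
        intro i' j' v' hv'
        rw [PySem.Dict.get?_insert] at hv'
        by_cases hij : (i', j') = (i, j)
        · rw [if_pos hij] at hv'
          cases hij
          simp only [Option.some.injEq] at hv'
          rw [← hv', hv]
        · rw [if_neg hij] at hv'
          exact hgd1 i' j' v' hv'
      · -- only right
        obtain ⟨hd2, hgd2⟩ := ih i (j+1) memo (by omega) hg
        simp only [hd2]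
        have hv : pvGv maze i j + pvVals maze i (j+1) = pvVals maze i j := by
          conv_rhs => rw [pvVals]
          rw [dif_neg h1, dif_pos h2]
        refine ⟨hv, ?_⟩
        intro i' j' v' hv'
        rw [PySem.Dict.get?_insert] at hv'
        by_cases hij : (i', j') = (i, j)
        · rw [if_pos hij] at hv'
          cases hij
          simp only [Option.some.injEq] at hv'
          rw [← hv', hv]
        · rw [if_neg hij] at hv'
          exact hgd2 i' j' v' hv'
      · -- neither
        have hv : pvGv maze i j = pvVals maze i j := by
          rw [pvVals, dif_neg h1, dif_neg h2]
          simp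
        refine ⟨hv, ?_⟩
        intro i' j' v' hv'
        rw [PySem.Dict.get?_insert] at hv'
        by_cases hij : (i', j') = (i, j)
        · rw [if_pos hij] at hv'
          cases hij
          simp only [Option.some.injEq] at hv'
          rw [← hv', hv]
        · rw [if_neg hij] at hv'
          exact hg i' j' v' hv'

theorem pvB_value (maze : List (List Int)) :
    getTesla_alt maze = if 0 < pvVals maze 0 0 then 1 else -(pvVals maze 0 0) + 1 := by
  have h := (pvBestM_spec maze (maze.length + (maze.getD 0 []).length) 0 0 PySem.Dict.empty
    (by omega) (by intro i j v hv; rw [PySem.Dict.get?_empty] at hv; cases hv)).1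
  unfold getTesla_alt
  simp only []
  rw [h]

-- ===== VERDICT (by name: the statement is the Claim_ definition above) =====
theorem getTesla_spec : Claim_equal_getTesla := by
  intro maze _ hP
  unfold Spec_getTesla
  rw [pvA_value maze hP, pvB_value maze]
  by_cases h : pvVals maze 0 0 ≤ 0
  · rw [if_pos h, if_neg (by omega)]
  · rw [if_neg h, if_pos (by omega)]
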